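-- pv_equiv track=rewrite | github.com/xishansnow/AutoSchemaKG.Sanguo | llm_api/stubs.py | stub_call_llm_for_concepts
-- ===== SOURCE A (Python) =====
-- from typing import Dict, List
--
-- def stub_call_llm_for_concepts(node_list: List[str]) -> Dict[str, str]:
--     """
--     STUB: Generate induced concepts for nodes.
--
--     Returns hard-coded mock concept descriptions that simulate LLM analysis.
--     Uses keyword matching to provide semi-realistic concepts.
--
--     Args:
--         node_list (List[str]): List of node names
--
--     Returns:
--         Dict[str, str]: Mapping of node to concept description
--     """
--     induced_concepts = {}
--
--     for node in node_list:
--         node_lower = node.lower()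
--
--         # Medical drugs/medications
--         if any(term in node_lower for term in ['metformin', 'insulin', 'ace inhibitor', 'statin']):
--             induced_concepts[node] = "a type of pharmaceutical medication"
--
--         # Diseases/conditions
--         elif any(term in node_lower for term in ['diabetes', 'hypertension', 'nephropathy', 'disease', 'syndrome']):
--             induced_concepts[node] = "a medical disease or disorder"
--
--         # Symptoms/signs
--         elif any(term in node_lower for term in ['blood pressure', 'blood sugar', 'glucose', 'symptom']):
--             induced_concepts[node] = "a physiological sign or symptom"
--
--         # Procedures/tests
--         elif any(term in node_lower for term in ['monitoring', 'testing', 'assessment', 'diagnosis', 'screening']):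
--             induced_concepts[node] = "a medical diagnostic or monitoring procedure"
--
--         # Clinical activities (events)
--         elif any(term in node_lower for term in ['trial', 'treatment', 'intervention', 'prescription', 'initiation']):
--             induced_concepts[node] = "a clinical intervention or treatment activity"
--
--         # Patient/people
--         elif any(term in node_lower for term in ['patient', 'provider', 'individual']):
--             induced_concepts[node] = "a person or healthcare stakeholder"
--
--         # Body parts/systems
--         elif any(term in node_lower for term in ['kidney', 'liver', 'heart', 'function', 'tissue']):
--             induced_concepts[node] = "a body part or physiological system"
--
--         # Risk factors
--         elif any(term in node_lower for term in ['risk', 'sensitivity', 'resistance']):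
--             induced_concepts[node] = "a health risk factor or biological mechanism"
--
--         # Default for unmatched terms
--         else:
--             induced_concepts[node] = "a medical concept"
--
--     return induced_concepts
-- ===== SOURCE B (Python) =====
-- RULES = [
--     (['metformin', 'insulin', 'ace inhibitor', 'statin'], "a type of pharmaceutical medication"),
--     (['diabetes', 'hypertension', 'nephropathy', 'disease', 'syndrome'], "a medical disease or disorder"),
--     (['blood pressure', 'blood sugar', 'glucose', 'symptom'], "a physiological sign or symptom"),
--     (['monitoring', 'testing', 'assessment', 'diagnosis', 'screening'], "a medical diagnostic or monitoring procedure"),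
--     (['trial', 'treatment', 'intervention', 'prescription', 'initiation'], "a clinical intervention or treatment activity"),
--     (['patient', 'provider', 'individual'], "a person or healthcare stakeholder"),
--     (['kidney', 'liver', 'heart', 'function', 'tissue'], "a body part or physiological system"),
--     (['risk', 'sensitivity', 'resistance'], "a health risk factor or biological mechanism"),
-- ]
-- DEFAULT = "a medical concept"
--
-- def stub_call_llm_for_concepts(node_list):
--     # Rule-major sieve: iterate over the rules (outer), peeling off the yet-unclassified
--     # nodes each rule matches (inner); first-match priority falls out because a node
--     # claimed by an earlier rule is no longer in the pool for later rules.
--     nodes = list(dict.fromkeys(node_list))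
--     concept_of = {}
--     remaining = nodes
--     for terms, concept in RULES:
--         still = []
--         for node in remaining:
--             low = node.lower()
--             if any(t in low for t in terms):
--                 concept_of[node] = concept
--             else:
--                 still.append(node)
--         remaining = still
--     return {node: concept_of.get(node, DEFAULT) for node in nodes}
-- ===== Notes on version B (the rewrite author's own statement) =====
-- stated objective: alternative
-- what changed: Transposes the traversal: instead of A's node-major pass running an eight-branch elif chain per node, B dedups the nodes first and runs a rule-major sieve - each rule in priority order claims the yet-unclassified nodes it matches and removes them from the pool - then reads the answers back in first-occurrence order with a default for unclaimed nodes.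
import Mathlib
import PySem

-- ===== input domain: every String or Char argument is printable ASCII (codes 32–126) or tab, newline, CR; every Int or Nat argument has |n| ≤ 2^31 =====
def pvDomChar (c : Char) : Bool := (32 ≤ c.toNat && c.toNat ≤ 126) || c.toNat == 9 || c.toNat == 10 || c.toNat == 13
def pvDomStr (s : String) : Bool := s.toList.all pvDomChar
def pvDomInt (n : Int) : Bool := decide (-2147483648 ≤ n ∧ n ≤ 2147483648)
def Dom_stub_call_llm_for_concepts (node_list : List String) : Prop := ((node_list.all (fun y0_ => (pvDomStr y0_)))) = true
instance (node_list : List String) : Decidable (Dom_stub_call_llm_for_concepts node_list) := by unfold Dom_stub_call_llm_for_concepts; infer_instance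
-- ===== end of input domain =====

-- B transposes A's traversal: a rule-major sieve (each rule claims the yet-unclassified
-- nodes it matches) instead of A's node-major elif chain (alternative decomposition).

-- ===== PORT A =====
-- A's per-node elif chain, branches in source order.
def pvConceptA (node : String) : String :=
  let node_lower := PySem.Str.lower node
  if ["metformin", "insulin", "ace inhibitor", "statin"].any (fun term => PySem.Str.isIn term node_lower) then
    "a type of pharmaceutical medication"
  else if ["diabetes", "hypertension", "nephropathy", "disease", "syndrome"].any (fun term => PySem.Str.isIn term node_lower) then
    "a medical disease or disorder"
  else if ["blood pressure", "blood sugar", "glucose", "symptom"].any (fun term => PySem.Str.isIn term node_lower) then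
    "a physiological sign or symptom"
  else if ["monitoring", "testing", "assessment", "diagnosis", "screening"].any (fun term => PySem.Str.isIn term node_lower) then
    "a medical diagnostic or monitoring procedure"
  else if ["trial", "treatment", "intervention", "prescription", "initiation"].any (fun term => PySem.Str.isIn term node_lower) then
    "a clinical intervention or treatment activity"
  else if ["patient", "provider", "individual"].any (fun term => PySem.Str.isIn term node_lower) then
    "a person or healthcare stakeholder"
  else if ["kidney", "liver", "heart", "function", "tissue"].any (fun term => PySem.Str.isIn term node_lower) then
    "a body part or physiological system"
  else if ["risk", "sensitivity", "resistance"].any (fun term => PySem.Str.isIn term node_lower) then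
    "a health risk factor or biological mechanism"
  else
    "a medical concept"

def stub_call_llm_for_concepts (node_list : List String) : List (String × String) :=
  (node_list.foldl (fun induced_concepts node => induced_concepts.insert node (pvConceptA node))
    (PySem.Dict.empty : PySem.Dict String String)).items

-- ===== PORT B =====
def pvRules : List (List String × String) :=
  [ (["metformin", "insulin", "ace inhibitor", "statin"], "a type of pharmaceutical medication"),
    (["diabetes", "hypertension", "nephropathy", "disease", "syndrome"], "a medical disease or disorder"),
    (["blood pressure", "blood sugar", "glucose", "symptom"], "a physiological sign or symptom"),
    (["monitoring", "testing", "assessment", "diagnosis", "screening"], "a medical diagnostic or monitoring procedure"),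
    (["trial", "treatment", "intervention", "prescription", "initiation"], "a clinical intervention or treatment activity"),
    (["patient", "provider", "individual"], "a person or healthcare stakeholder"),
    (["kidney", "liver", "heart", "function", "tissue"], "a body part or physiological system"),
    (["risk", "sensitivity", "resistance"], "a health risk factor or biological mechanism") ]

-- inner sieve body: one node confronted with one rule's terms
def pvRuleStep (terms : List String) (concept : String)
    (st : PySem.Dict String String × List String) (node : String) :
    PySem.Dict String String × List String :=
  let low := PySem.Str.lower node
  if terms.any (fun t => PySem.Str.isIn t low) then (st.1.insert node concept, st.2)
  else (st.1, st.2 ++ [node])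

-- one rule sweeps the remaining pool (Python's inner 'for node in remaining')
def pvSieveRule (st : PySem.Dict String String × List String)
    (rule : List String × String) : PySem.Dict String String × List String :=
  st.2.foldl (pvRuleStep rule.1 rule.2) (st.1, [])

def stub_call_llm_for_concepts_alt (node_list : List String) : List (String × String) :=
  let nodes := PySem.List.dedup node_list
  let st := pvRules.foldl pvSieveRule ((PySem.Dict.empty : PySem.Dict String String), nodes)
  (nodes.foldl (fun d node => d.insert node (st.1.getD node "a medical concept"))
    (PySem.Dict.empty : PySem.Dict String String)).items

-- ===== PRECONDITION & SPEC =====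
def Spec_stub_call_llm_for_concepts (node_list : List String) (out : List (String × String)) : Prop := out = stub_call_llm_for_concepts_alt node_list
instance (node_list : List String) (out : List (String × String)) : Decidable (Spec_stub_call_llm_for_concepts node_list out) := by unfold Spec_stub_call_llm_for_concepts; infer_instance

-- ===== CLAIM (what is proved, stated in full; the proofs are below) =====
def Claim_equal_stub_call_llm_for_concepts : Prop := ∀ (node_list : List String), Dom_stub_call_llm_for_concepts node_list → Spec_stub_call_llm_for_concepts node_list (stub_call_llm_for_concepts node_list)

-- ===== LEMMAS AND PROOFS =====

-- does `node` match this rule's term list?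
def pvMatch (terms : List String) (node : String) : Bool :=
  terms.any (fun t => PySem.Str.isIn t (PySem.Str.lower node))

-- A's elif chain is first-match over pvRules
theorem pvConceptA_eq_find (node : String) :
    pvConceptA node
      = ((pvRules.find? (fun r => pvMatch r.1 node)).map Prod.snd).getD "a medical concept" := by
  unfold pvConceptA pvRules pvMatch
  simp only [List.find?]
  repeat' (split <;> (try simp_all))

-- the inner step, phrased through pvMatch
theorem pvRuleStep_eq (terms : List String) (concept : String)
    (st : PySem.Dict String String × List String) (node : String) :
    pvRuleStep terms concept st node
      = if pvMatch terms node then (st.1.insert node concept, st.2) else (st.1, st.2 ++ [node]) := by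
  simp [pvRuleStep, pvMatch]

-- the inner sweep: second component collects exactly the non-matching nodes, in order
theorem pvInner_snd (terms : List String) (concept : String) :
    ∀ (rem : List String) (d : PySem.Dict String String) (still : List String),
      (rem.foldl (pvRuleStep terms concept) (d, still)).2
        = still ++ rem.filter (fun n => !pvMatch terms n) := by
  intro rem
  induction rem with
  | nil => intro d still; simp
  | cons x xs ih =>
    intro d still
    rw [List.foldl_cons, pvRuleStep_eq, List.filter_cons]
    by_cases hx : pvMatch terms x
    · rw [if_pos hx, hx]
      simp only [Bool.not_true, Bool.false_eq_true, if_false]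
      exact ih (d.insert x concept) still
    · rw [if_neg hx, Bool.not_eq_true] at *
      rw [hx]
      simp only [Bool.not_false, if_true]
      rw [ih, List.append_assoc]
      rfl

-- the inner sweep: dictionary lookup after one rule's sweep
theorem pvInner_get? (terms : List String) (concept : String) (n : String) :
    ∀ (rem : List String) (d : PySem.Dict String String) (still : List String),
      (rem.foldl (pvRuleStep terms concept) (d, still)).1.get? n
        = if n ∈ rem ∧ pvMatch terms n then some concept else d.get? n := by
  intro rem
  induction rem with
  | nil => intro d still; simp
  | cons x xs ih =>
    intro d still
    rw [List.foldl_cons, pvRuleStep_eq]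
    by_cases hx : pvMatch terms x
    · rw [if_pos hx]
      rw [ih]
      by_cases hn : n ∈ xs ∧ pvMatch terms n
      · simp [hn, List.mem_cons.2 (Or.inr hn.1)]
      · rw [if_neg hn]
        by_cases hnx : n = x
        · subst hnx
          rw [PySem.Dict.get?_insert_self]
          simp [hx]
        · rw [PySem.Dict.get?_insert_of_ne _ _ hnx]
          by_cases hm : n ∈ x :: xs ∧ pvMatch terms n
          · exact absurd ⟨(List.mem_cons.1 hm.1).resolve_left hnx, hm.2⟩ hn
          · rw [if_neg hm]
    · rw [if_neg hx]
      rw [ih]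
      by_cases hn : n ∈ xs ∧ pvMatch terms n
      · simp [hn, List.mem_cons.2 (Or.inr hn.1)]
      · rw [if_neg hn]
        by_cases hm : n ∈ x :: xs ∧ pvMatch terms n
        · rcases hm with ⟨hm1, hm2⟩
          rcases List.mem_cons.1 hm1 with h | h
          · subst h; exact absurd hm2 hx
          · exact absurd ⟨h, hm2⟩ hn
        · rw [if_neg hm]

-- values already settled (node not in the pool) survive the rest of the sieve
theorem pvSieve_preserve (n : String) (v : String) :
    ∀ (rules : List (List String × String)) (d : PySem.Dict String String) (rem : List String),
      d.get? n = some v → n ∉ rem →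
      ((rules.foldl pvSieveRule (d, rem)).1).get? n = some v := by
  intro rules
  induction rules with
  | nil => intro d rem h _; simpa using h
  | cons r rs ih =>
    intro d rem h hn
    simp only [List.foldl, pvSieveRule]
    have h2 := pvInner_snd r.1 r.2 rem d []
    have h1 := pvInner_get? r.1 r.2 n rem d []
    rw [if_neg (fun hc => hn hc.1)] at h1
    -- rebuild the pair
    rcases hfold : rem.foldl (pvRuleStep r.1 r.2) (d, []) with ⟨d1, rem1⟩
    rw [hfold] at h1 h2
    simp only at h1 h2
    apply ih d1 rem1 (h1.trans h)
    intro hmem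
    rw [h2] at hmem
    simp only [List.nil_append, List.mem_filter] at hmem
    exact hn hmem.1

-- main invariant: a node still in the pool ends up with its first-match concept
theorem pvSieve_main (n : String) :
    ∀ (rules : List (List String × String)) (d : PySem.Dict String String) (rem : List String),
      n ∈ rem → d.get? n = none →
      ((rules.foldl pvSieveRule (d, rem)).1).getD n "a medical concept"
        = ((rules.find? (fun r => pvMatch r.1 n)).map Prod.snd).getD "a medical concept" := by
  intro rules
  induction rules with
  | nil =>
    intro d rem _ h
    simp [PySem.Dict.getD_eq_get?_getD, h]
  | cons r rs ih =>
    intro d rem hn h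
    simp only [List.foldl, pvSieveRule, List.find?]
    have h2 := pvInner_snd r.1 r.2 rem d []
    have h1 := pvInner_get? r.1 r.2 n rem d []
    rcases hfold : rem.foldl (pvRuleStep r.1 r.2) (d, []) with ⟨d1, rem1⟩
    rw [hfold] at h1 h2
    simp only at h1 h2
    by_cases hm : pvMatch r.1 n
    · rw [if_pos ⟨hn, hm⟩] at h1
      rw [hm]
      have := pvSieve_preserve n r.2 rs d1 rem1 h1 (by
        intro hmem
        rw [h2] at hmem
        simp only [List.nil_append, List.mem_filter] at hmem
        simp [hm] at hmem)
      simp [PySem.Dict.getD_eq_get?_getD, this]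
    · rw [if_neg (fun hc => hm hc.2)] at h1
      rw [Bool.not_eq_true] at hm
      rw [hm]
      exact ih d1 rem1 (by
          rw [h2]
          simp only [List.nil_append, List.mem_filter]
          exact ⟨hn, by simp [hm]⟩)
        (h1.trans h)

-- "new first occurrences of xs, given the already-seen keys"
def pvNew (seen : List String) : List String → List String
  | [] => []
  | x :: xs => if x ∈ seen then pvNew seen xs else x :: pvNew (seen ++ [x]) xs

theorem pvSet_foldl_add (xs : List String) : ∀ (s : PySem.Set String), s.Nodup →
    xs.foldl PySem.Set.add s = s ++ pvNew s xs := by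
  induction xs with
  | nil => intro s _; simp [pvNew]
  | cons x xs ih =>
    intro s hs
    simp only [List.foldl, pvNew]
    by_cases hx : x ∈ s
    · rw [if_pos hx]
      have : PySem.Set.add s x = s := by simp [PySem.Set.add, hx]
      rw [this, ih s hs]
    · rw [if_neg hx]
      have hadd : PySem.Set.add s x = s ++ [x] := by
        simp [PySem.Set.add, hx]
      rw [hadd, ih (s ++ [x])
        (by simp [List.nodup_append, hs]
            intro a ha h
            exact hx (h ▸ ha)), List.append_assoc]
      simp

theorem pvDedup_eq_pvNew (xs : List String) : PySem.List.dedup xs = pvNew [] xs := by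
  have := pvSet_foldl_add xs [] (by simp)
  simp only [List.nil_append] at this
  simp [PySem.List.dedup_eq_ofList, PySem.Set.ofList_eq_foldl, this]

theorem pvFoldl_insert_items (f : String → String) (xs : List String) :
    ∀ (d : PySem.Dict String String), (∀ p ∈ d.items, p.2 = f p.1) → d.keys.Nodup →
    (xs.foldl (fun d n => d.insert n (f n)) d).items
      = d.items ++ (pvNew d.keys xs).map (fun n => (n, f n)) := by
  induction xs with
  | nil => intro d _ _; simp [pvNew]
  | cons x xs ih =>
    intro d hd hnd
    simp only [List.foldl, pvNew]
    by_cases hx : x ∈ d.keys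
    · have hc : d.contains x = true := (PySem.Dict.contains_iff_mem_keys _ _).2 hx
      have heq : d.insert x (f x) = d := by
        apply PySem.Dict.ext
        rw [PySem.Dict.items_insert_of_contains _ _ hc]
        have h1 : ∀ p ∈ d.items, (if (p.1 == x) = true then (x, f x) else p) = id p := by
          intro p hp
          by_cases hpx : p.1 = x
          · simp only [hpx, BEq.rfl, if_true, id_eq]
            rw [← hpx, ← hd p hp]
          · simp [hpx]
        rw [List.map_congr_left h1, List.map_id]
      rw [heq, if_pos hx, ih d hd hnd]
    · have hc : d.contains x = false := by
        by_contra h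
        exact hx ((PySem.Dict.contains_iff_mem_keys _ _).1 (by simpa using h))
      have hitems := PySem.Dict.items_insert_of_not_contains d (f x) hc
      have hkeys := PySem.Dict.keys_insert_of_not_contains d (f x) hc
      rw [if_neg hx, ih (d.insert x (f x))
        (by intro p hp
            rw [hitems] at hp
            rcases List.mem_append.1 hp with h | h
            · exact hd p h
            · simp at h; simp [h])
        (by rw [hkeys]
            simp [List.nodup_append, hnd]
            intro a ha h
            exact hx (h ▸ ha)),
        hitems, hkeys, List.append_assoc, List.map_cons]
      simp

-- ===== VERDICT (by name: the statement is the Claim_ definition above) =====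
theorem stub_call_llm_for_concepts_spec : Claim_equal_stub_call_llm_for_concepts := by
  intro node_list _
  unfold Spec_stub_call_llm_for_concepts stub_call_llm_for_concepts stub_call_llm_for_concepts_alt
  -- A's side: the dict loop over node_list yields the deduped nodes paired with pvConceptA
  rw [pvFoldl_insert_items pvConceptA node_list PySem.Dict.empty (by simp [PySem.Dict.empty])
        (by simp [PySem.Dict.keys_empty])]
  simp only [PySem.Dict.empty, PySem.Dict.keys]
  -- B's side: the final comprehension over the (nodup, fresh) deduped nodes appends its pairs
  have hnodup : (PySem.List.dedup node_list).Nodup := by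
    simp [PySem.List.dedup_eq_ofList, PySem.Set.nodup_ofList]
  have hB := PySem.Dict.items_foldl_insert_fresh
      (l := PySem.List.dedup node_list) (k := fun n => n)
      (v := fun node =>
        (pvRules.foldl pvSieveRule ((PySem.Dict.empty : PySem.Dict String String),
          PySem.List.dedup node_list)).1.getD node "a medical concept")
      (d := PySem.Dict.empty) (by simp) (by simpa using hnodup)
  beta_reduce at hB
  simp only [PySem.Dict.empty] at hB ⊢
  rw [hB]
  simp only [List.map_nil, List.nil_append]
  rw [← pvDedup_eq_pvNew]
  apply List.map_congr_left
  intro n hn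
  have := pvSieve_main n pvRules PySem.Dict.empty (PySem.List.dedup node_list) hn
    (by simp)
  simp only [PySem.Dict.empty] at this
  rw [this, ← pvConceptA_eq_find]
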